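-- pv_equiv track=rewrite | github.com/qpointz/qpointz | etc/docker/sphinx-ci/versioner_old.py | versions
-- ===== SOURCE A (Python) =====
-- def versions(branches, tags):
--     vrs = []
--     def apnd(label, path):
--         np = path.replace('/','-')
--         vrs.append(f"\"{label}\":\"{np}\"")
--     for branch in enumerate(filter(lambda x: x[3] == 0, branches)):
--         apnd(branch[1][0], branch[1][1])
--     for tag in tags:
--         apnd(tag[0], tag[1])
--     for branch in enumerate(filter(lambda x: x[3] != 0, branches)):
--         apnd(branch[1][0], branch[1][1])
--     return "{"+','.join(vrs)+"}"
-- ===== SOURCE B (Python) =====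
-- def versions(branches, tags):
--     zeros, nonzeros = [], []
--     for x in branches:
--         entry = f"\"{x[0]}\":\"{x[1].replace('/','-')}\""
--         if x[3] == 0:
--             zeros.append(entry)
--         else:
--             nonzeros.append(entry)
--     mid = [f"\"{t[0]}\":\"{t[1].replace('/','-')}\"" for t in tags]
--     return "{" + ",".join(zeros + mid + nonzeros) + "}"
-- ===== Notes on version B (the rewrite author's own statement) =====
-- stated objective: simpler
-- what changed: Replaces the two complementary filter-scans of branches (with a mutated shared vrs list and a closure helper) by one partitioning pass that builds the zero/nonzero entry lists directly, then concatenates zeros ++ tag entries ++ nonzeros and joins once.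
import Mathlib
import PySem

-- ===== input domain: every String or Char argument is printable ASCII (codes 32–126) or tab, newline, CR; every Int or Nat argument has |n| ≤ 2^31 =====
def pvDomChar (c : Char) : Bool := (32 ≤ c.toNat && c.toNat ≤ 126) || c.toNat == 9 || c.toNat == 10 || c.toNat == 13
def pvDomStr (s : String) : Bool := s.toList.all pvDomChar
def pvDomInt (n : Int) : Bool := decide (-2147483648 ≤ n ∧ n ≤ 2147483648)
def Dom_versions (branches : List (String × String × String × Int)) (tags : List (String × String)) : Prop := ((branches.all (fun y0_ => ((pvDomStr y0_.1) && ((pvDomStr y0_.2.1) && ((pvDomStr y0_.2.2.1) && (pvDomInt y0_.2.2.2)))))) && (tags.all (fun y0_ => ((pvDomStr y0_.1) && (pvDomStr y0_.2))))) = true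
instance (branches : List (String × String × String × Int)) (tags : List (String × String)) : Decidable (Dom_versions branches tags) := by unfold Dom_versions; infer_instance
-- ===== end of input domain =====

-- B replaces A's two filter-scans over branches (sharing one mutated vrs list via a closure) by a
-- single partitioning pass plus one concatenation; objective: simpler, same cost.

-- ===== PORT A =====
-- A's inner `apnd` closure: append the formatted entry to the shared vrs list.
def versionsApnd (vrs : List String) (label path : String) : List String :=
  vrs ++ ["\"" ++ label ++ "\":\"" ++ PySem.Str.replace path "/" "-" ++ "\""]

def versions (branches : List (String × String × String × Int)) (tags : List (String × String)) : String :=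
  let vrs : List String := []
  let vrs := (PySem.List.enumerate (branches.filter (fun x => x.2.2.2 == 0))).foldl
      (fun acc branch => versionsApnd acc branch.2.1 branch.2.2.1) vrs
  let vrs := tags.foldl (fun acc tag => versionsApnd acc tag.1 tag.2) vrs
  let vrs := (PySem.List.enumerate (branches.filter (fun x => x.2.2.2 != 0))).foldl
      (fun acc branch => versionsApnd acc branch.2.1 branch.2.2.1) vrs
  "{" ++ PySem.Str.join "," vrs ++ "}"

-- ===== PORT B =====
def versionsEntry (label path : String) : String :=
  "\"" ++ label ++ "\":\"" ++ PySem.Str.replace path "/" "-" ++ "\""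

def versions_alt (branches : List (String × String × String × Int)) (tags : List (String × String)) : String :=
  let p := branches.foldl (fun (acc : List String × List String) x =>
      if x.2.2.2 == 0 then (acc.1 ++ [versionsEntry x.1 x.2.1], acc.2)
      else (acc.1, acc.2 ++ [versionsEntry x.1 x.2.1])) ([], [])
  let mid := tags.map (fun t => versionsEntry t.1 t.2)
  "{" ++ PySem.Str.join "," (p.1 ++ mid ++ p.2) ++ "}"

-- ===== PRECONDITION & SPEC =====
def Spec_versions (branches : List (String × String × String × Int)) (tags : List (String × String)) (out : String) : Prop := out = versions_alt branches tags
instance (branches : List (String × String × String × Int)) (tags : List (String × String)) (out : String) : Decidable (Spec_versions branches tags out) := by unfold Spec_versions; infer_instance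

-- ===== CLAIM (what is proved, stated in full; the proofs are below) =====
def Claim_equal_versions : Prop := ∀ (branches : List (String × String × String × Int)) (tags : List (String × String)), Dom_versions branches tags → Spec_versions branches tags (versions branches tags)

-- ===== LEMMAS AND PROOFS =====

theorem foldl_apnd_enumerate :
    ∀ (l : List (String × String × String × Int)) (s : Int) (acc : List String),
      (PySem.List.enumerate l s).foldl
        (fun acc branch => versionsApnd acc branch.2.1 branch.2.2.1) acc
      = acc ++ l.map (fun x => versionsEntry x.1 x.2.1) := by
  intro l
  induction l with
  | nil => intro s acc; simp [PySem.List.enumerate_nil]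
  | cons x xs ih =>
    intro s acc
    rw [PySem.List.enumerate_cons, List.foldl_cons, ih]
    simp [versionsApnd, versionsEntry]

theorem foldl_apnd_tags :
    ∀ (l : List (String × String)) (acc : List String),
      l.foldl (fun acc tag => versionsApnd acc tag.1 tag.2) acc
      = acc ++ l.map (fun t => versionsEntry t.1 t.2) := by
  intro l
  induction l with
  | nil => intro acc; simp
  | cons x xs ih =>
    intro acc
    rw [List.foldl_cons, ih]
    simp [versionsApnd, versionsEntry]

theorem foldl_partition :
    ∀ (l : List (String × String × String × Int)) (acc : List String × List String),
      l.foldl (fun (acc : List String × List String) x =>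
          if x.2.2.2 == 0 then (acc.1 ++ [versionsEntry x.1 x.2.1], acc.2)
          else (acc.1, acc.2 ++ [versionsEntry x.1 x.2.1])) acc
      = (acc.1 ++ (l.filter (fun x => x.2.2.2 == 0)).map (fun x => versionsEntry x.1 x.2.1),
         acc.2 ++ (l.filter (fun x => x.2.2.2 != 0)).map (fun x => versionsEntry x.1 x.2.1)) := by
  intro l
  induction l with
  | nil => intro acc; simp
  | cons x xs ih =>
    intro acc
    rw [List.foldl_cons, ih]
    by_cases h : x.2.2.2 = 0 <;> simp [h]

theorem versions_spec : Claim_equal_versions := by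
  unfold Claim_equal_versions
  intro branches tags _
  unfold Spec_versions versions versions_alt
  simp only [foldl_apnd_enumerate, foldl_apnd_tags, foldl_partition]
  simp
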